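-- pv_equiv track=rewrite | github.com/Hristiyan-Andreev/HackBuglaria | Week0/ex14.py | biggest_difference
-- ===== SOURCE A (Python) =====
-- def biggest_difference(array):
--     max = min = array[0]
--     for number in array:
--         if number > max:
--             max = number
--         elif number < min:
--             min = number
--     return min - max
-- ===== SOURCE B (Python) =====
-- def biggest_difference(array):
--     s = sorted(array)
--     return s[0] - s[-1]
-- ===== Notes on version B (the rewrite author's own statement) =====
-- stated objective: idiomatic
-- what changed: Replaces the manual single-pass min/max tracking loop with sort-then-index: sort the array and subtract the last (largest) element from the first (smallest).
import Mathlib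
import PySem

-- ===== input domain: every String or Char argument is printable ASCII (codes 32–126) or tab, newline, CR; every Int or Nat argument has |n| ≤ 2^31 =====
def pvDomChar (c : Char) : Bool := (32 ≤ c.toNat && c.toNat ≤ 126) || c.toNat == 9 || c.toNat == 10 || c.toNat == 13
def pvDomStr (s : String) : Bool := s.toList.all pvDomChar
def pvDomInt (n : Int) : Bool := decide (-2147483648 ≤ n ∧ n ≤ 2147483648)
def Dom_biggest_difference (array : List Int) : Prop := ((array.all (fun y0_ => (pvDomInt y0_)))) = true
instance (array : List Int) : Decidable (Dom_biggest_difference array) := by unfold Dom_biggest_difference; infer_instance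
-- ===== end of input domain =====

-- B changes the algorithm (sort then index ends) rather than a tracking loop; equivalence of RETURN values on non-empty lists.
-- ===== PORT A =====
-- one loop step: 'if number > max: max = number elif number < min: min = number'
def bdStep (p : Int × Int) (number : Int) : Int × Int :=
  if number > p.1 then (number, p.2)
  else if number < p.2 then (p.1, number)
  else p

def biggest_difference (array : List Int) : Int :=
  match PySem.List.pyGet? array 0 with
  | none => 0          -- unreachable under Pre_ (Python raises IndexError on [])
  | some a0 =>
    let st := array.foldl bdStep (a0, a0)
    st.2 - st.1

-- ===== PORT B =====
def biggest_difference_alt (array : List Int) : Int :=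
  let s := PySem.List.sorted array (fun x => x) false
  (PySem.List.pyGet? s 0).getD 0 - (PySem.List.pyGet? s (-1)).getD 0
  -- getD 0 is unreachable under Pre_: sorted of a non-empty list is non-empty

-- ===== PRECONDITION & SPEC =====
-- Pre_ excludes only the empty list, on which Python A raises IndexError (array[0]).
def Pre_biggest_difference (array : List Int) : Prop := array ≠ []
instance (array : List Int) : Decidable (Pre_biggest_difference array) := by unfold Pre_biggest_difference; infer_instance
def pvWitness_biggest_difference : List Int := ([3, -1, 4, 1, 5])

def Spec_biggest_difference (array : List Int) (out : Int) : Prop := out = biggest_difference_alt array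
instance (array : List Int) (out : Int) : Decidable (Spec_biggest_difference array out) := by unfold Spec_biggest_difference; infer_instance

-- ===== CLAIM (what is proved, stated in full; the proofs are below) =====
def Claim_equal_biggest_difference : Prop := ∀ (array : List Int), Dom_biggest_difference array → Pre_biggest_difference array → Spec_biggest_difference array (biggest_difference array)

-- ===== LEMMAS AND PROOFS =====

-- the tracking loop computes (fold max, fold min), provided min ≤ max at entry
theorem bd_foldl (l : List Int) (mx mn : Int) (h : mn ≤ mx) :
    l.foldl bdStep (mx, mn) = (l.foldl max mx, l.foldl min mn) := by
  induction l generalizing mx mn with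
  | nil => rfl
  | cons x t ih =>
    simp only [List.foldl_cons, bdStep]
    split_ifs with h1 h2
    · rw [ih x mn (by omega)]
      congr 1
      · congr 1; omega
      · congr 1; omega
    · rw [ih mx x (by omega)]
      congr 1
      · congr 1; omega
      · congr 1; omega
    · rw [ih mx mn h]
      congr 1
      · congr 1; omega
      · congr 1; omega

theorem foldl_min_mem (a : Int) (l : List Int) : l.foldl min a ∈ a :: l := by
  induction l generalizing a with
  | nil => simp
  | cons x t ih =>
    simp only [List.foldl_cons]
    rcases List.mem_cons.mp (ih (min a x)) with h | h
    · rcases min_choice a x with hm | hm <;> rw [hm] at h ⊢ <;> simp [h]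
    · simp [h]

theorem foldl_min_le (a : Int) (l : List Int) : ∀ y ∈ a :: l, l.foldl min a ≤ y := by
  induction l generalizing a with
  | nil => simp
  | cons x t ih =>
    intro y hy
    simp only [List.foldl_cons]
    have hbase := ih (min a x) (min a x) (by simp)
    simp only [List.mem_cons] at hy
    rcases hy with rfl | rfl | hy'
    · exact le_trans hbase (min_le_left _ _)
    · exact le_trans hbase (min_le_right _ _)
    · exact ih (min a x) y (List.mem_cons_of_mem _ hy')

theorem foldl_max_mem (a : Int) (l : List Int) : l.foldl max a ∈ a :: l := by
  induction l generalizing a with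
  | nil => simp
  | cons x t ih =>
    simp only [List.foldl_cons]
    rcases List.mem_cons.mp (ih (max a x)) with h | h
    · rcases max_choice a x with hm | hm <;> rw [hm] at h ⊢ <;> simp [h]
    · simp [h]

theorem foldl_max_ge (a : Int) (l : List Int) : ∀ y ∈ a :: l, y ≤ l.foldl max a := by
  induction l generalizing a with
  | nil => simp
  | cons x t ih =>
    intro y hy
    simp only [List.foldl_cons]
    have hbase := ih (max a x) (max a x) (by simp)
    simp only [List.mem_cons] at hy
    rcases hy with rfl | rfl | hy'
    · exact le_trans (le_max_left _ _) hbase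
    · exact le_trans (le_max_right _ _) hbase
    · exact ih (max a x) y (List.mem_cons_of_mem _ hy')

-- in a ≤-sorted list every element is ≤ the last one
theorem pairwise_le_getLast (l : List Int) (hl : l ≠ [])
    (hp : l.Pairwise (fun a b => a ≤ b)) : ∀ y ∈ l, y ≤ l.getLast hl := by
  induction l with
  | nil => simp at hl
  | cons x t ih =>
    intro y hy
    rcases List.pairwise_cons.mp hp with ⟨hx, ht⟩
    cases t with
    | nil => simp at hy; simp [hy, List.getLast]
    | cons z u =>
      rw [List.getLast_cons (by simp)]
      simp only [List.mem_cons] at hy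
      rcases hy with rfl | hy'
      · exact le_trans (hx z (by simp)) (ih (by simp) ht z (by simp))
      · exact ih (by simp) ht y (by simp [hy'])

theorem biggest_difference_spec' (array : List Int) (hne : array ≠ []) :
    biggest_difference array = biggest_difference_alt array := by
  obtain ⟨a, t, rfl⟩ := List.exists_cons_of_ne_nil hne
  -- A side
  have hA : biggest_difference (a :: t) = t.foldl min a - t.foldl max a := by
    simp only [biggest_difference, PySem.List.pyGet?_zero_cons]
    rw [show (a :: t).foldl bdStep (a, a) = t.foldl bdStep (a, a) by
      simp [List.foldl_cons, bdStep]]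
    rw [bd_foldl t a a le_rfl]
  -- B side
  set s := PySem.List.sorted (a :: t) (fun x => x) false with hs
  have hperm : s.Perm (a :: t) := PySem.List.sorted_perm _ _ _
  have hsne : s ≠ [] := by
    intro h0
    have := hperm.length_eq; rw [h0] at this; simp at this
  obtain ⟨m, t', hcons⟩ := List.exists_cons_of_ne_nil hsne
  have hmemS : ∀ y, y ∈ s ↔ y ∈ a :: t := fun y => hperm.mem_iff
  -- head of sorted = fold min
  have hhead_le : ∀ y ∈ a :: t, m ≤ y := by
    intro y hy
    have := PySem.List.key_head_sorted_le (xs := a :: t) (key := fun x => x) (m := m) (t := t') (by rw [← hs, hcons]) y hy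
    simpa using this
  have hmin : m = t.foldl min a := by
    have h1 : m ≤ t.foldl min a := hhead_le _ (foldl_min_mem a t)
    have h2 : t.foldl min a ≤ m := by
      apply foldl_min_le a t m
      rw [← hmemS]; rw [hcons]; simp
    omega
  -- last of sorted = fold max
  have hpair : s.Pairwise (fun x y => x ≤ y) := by
    have := PySem.List.sorted_pairwise (xs := a :: t) (key := fun x => x)
    simpa [hs] using this
  have hlast_ge : ∀ y ∈ a :: t, y ≤ s.getLast hsne := by
    intro y hy
    exact pairwise_le_getLast s hsne hpair y ((hmemS y).mpr hy)
  have hmax : s.getLast hsne = t.foldl max a := by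
    have h1 : t.foldl max a ≤ s.getLast hsne := hlast_ge _ (foldl_max_mem a t)
    have h2 : s.getLast hsne ≤ t.foldl max a := by
      apply foldl_max_ge a t
      rw [← hmemS]; exact List.getLast_mem hsne
    omega
  have hB : biggest_difference_alt (a :: t) = m - s.getLast hsne := by
    have h0 : PySem.List.pyGet? s 0 = some m := by rw [hcons]; simp
    have h1 : PySem.List.pyGet? s (-1) = some (s.getLast hsne) := by
      rw [PySem.List.pyGet?_neg_one, List.getLast?_eq_some_getLast]
    show (PySem.List.pyGet? s 0).getD 0 - (PySem.List.pyGet? s (-1)).getD 0 = m - s.getLast hsne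
    rw [h0, h1]
    rfl
  rw [hA, hB, hmin, hmax]

-- ===== VERDICT (by name: the statement is the Claim_ definition above) =====
theorem biggest_difference_spec : Claim_equal_biggest_difference := by
  intro array _ hpre
  exact biggest_difference_spec' array hpre
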